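-- pv_equiv track=rewrite | github.com/pypi-data/pypi-mirror-402 | packages/finquotes/finquotes-0.68.0-py3-none-any.whl/finquotes/yahoo.py | replace_comma_within_prices
-- ===== SOURCE A (Python) =====
-- def replace_comma_within_prices(string: str) -> str:
--     """Replace comma in the names of companies."""
--     in_prices = False
--     new_line = ""
--     for char in string:
--         if char == '"':
--             in_prices = not in_prices
--         new_char = " " if char == "," and in_prices else char
--         new_line += new_char
--     return new_line
-- ===== SOURCE B (Python) =====
-- def replace_comma_within_prices(string: str) -> str:
--     """Replace comma in the names of companies."""
--     parts = string.split('"')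
--     fixed = [p if i % 2 == 0 else ''.join(' ' if c == ',' else c for c in p)
--              for i, p in enumerate(parts)]
--     return '"'.join(fixed)
-- ===== Notes on version B (the rewrite author's own statement) =====
-- stated objective: faster
-- what changed: B splits the string on the double-quote character and rewrites commas to spaces only in odd-indexed (inside-quotes) segments, then rejoins, instead of A's per-character scan with a running in_prices flag and quadratic string concatenation.
import Mathlib
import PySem

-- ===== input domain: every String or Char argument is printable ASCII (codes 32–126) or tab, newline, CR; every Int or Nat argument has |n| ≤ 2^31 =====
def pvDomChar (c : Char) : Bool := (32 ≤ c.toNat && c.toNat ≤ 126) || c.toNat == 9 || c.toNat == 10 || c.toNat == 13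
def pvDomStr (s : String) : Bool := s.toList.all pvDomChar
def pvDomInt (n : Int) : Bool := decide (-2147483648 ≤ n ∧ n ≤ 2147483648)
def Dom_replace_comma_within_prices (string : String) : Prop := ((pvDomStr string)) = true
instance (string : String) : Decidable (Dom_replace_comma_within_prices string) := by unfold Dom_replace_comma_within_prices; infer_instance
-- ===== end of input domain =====

-- B replaces A's per-character running-flag scan (with quadratic string concatenation) by split-on-'"' / map odd segments / rejoin (measured faster; return value only).


-- ===== PORT A =====
-- literal transliteration of A: fold over the characters carrying (in_prices, new_line)
def replace_comma_within_prices (string : String) : String :=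
  let r := string.toList.foldl (fun (st : Bool × List Char) char =>
    let in_prices := if char == '"' then !st.1 else st.1
    let new_char := if char == ',' && in_prices then ' ' else char
    (in_prices, st.2 ++ [new_char])) (false, [])
  String.ofList r.2

-- ===== PORT B =====
-- literal transliteration of B: split on '"', rewrite commas in odd-indexed segments, rejoin
def replace_comma_within_prices_alt (string : String) : String :=
  let parts := List.splitOn '"' string.toList
  let fixed := (PySem.List.enumerate parts).map (fun ip =>
    if ip.1 % 2 == 0 then ip.2
    else ip.2.map (fun c => if c == ',' then ' ' else c))
  String.ofList (List.intercalate ['"'] fixed)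

-- ===== PRECONDITION & SPEC =====
def Spec_replace_comma_within_prices (string : String) (out : String) : Prop := out = replace_comma_within_prices_alt string
instance (string : String) (out : String) : Decidable (Spec_replace_comma_within_prices string out) := by unfold Spec_replace_comma_within_prices; infer_instance

-- ===== CLAIM (what is proved, stated in full; the proofs are below) =====
def Claim_equal_replace_comma_within_prices : Prop := ∀ (string : String), Dom_replace_comma_within_prices string → Spec_replace_comma_within_prices string (replace_comma_within_prices string)

-- ===== LEMMAS AND PROOFS =====

-- per-character rewrite used inside quotes
def pvSub (p : List Char) : List Char := p.map (fun c => if c == ',' then ' ' else c)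

-- one segment, under flag b
def pvSeg (b : Bool) (p : List Char) : List Char := if b then pvSub p else p

-- reassemble the segment list with alternating flags, '"' between segments
def pvGlue : Bool → List (List Char) → List Char
  | _, [] => []
  | b, [p] => pvSeg b p
  | b, p :: q :: ps => pvSeg b p ++ '"' :: pvGlue (!b) (q :: ps)

-- recursive form of A's scan
def pvGoA : Bool → List Char → List Char
  | _, [] => []
  | b, c :: cs =>
    let b' := if c == '"' then !b else b
    (if c == ',' && b' then ' ' else c) :: pvGoA b' cs

theorem pvFoldA (cs : List Char) : ∀ (b : Bool) (acc : List Char),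
    (cs.foldl (fun (st : Bool × List Char) char =>
      let in_prices := if char == '"' then !st.1 else st.1
      let new_char := if char == ',' && in_prices then ' ' else char
      (in_prices, st.2 ++ [new_char])) (b, acc)).2 = acc ++ pvGoA b cs := by
  induction cs with
  | nil => intro b acc; simp [pvGoA]
  | cons c cs ih =>
    intro b acc
    simp only [List.foldl_cons, pvGoA]
    rw [ih]
    simp

theorem pvIntercalate_cons_cons (sep a b : List Char) (l : List (List Char)) :
    List.intercalate sep (a :: b :: l) = a ++ sep ++ List.intercalate sep (b :: l) := by
  simp [List.intercalate, List.intersperse]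

theorem pvSplitOn_ne_nil (cs : List Char) : List.splitOn '"' cs ≠ [] := by
  simp only [List.splitOn]; exact List.splitOnP_ne_nil _ _

theorem pvSplitOn_cons (c : Char) (cs : List Char) :
    List.splitOn '"' (c :: cs) =
      if c = '"' then [] :: List.splitOn '"' cs
      else List.modifyHead (List.cons c) (List.splitOn '"' cs) := by
  simp only [List.splitOn, List.splitOnP_cons, beq_iff_eq]

theorem pvGoA_glue (cs : List Char) : ∀ (b : Bool),
    pvGoA b cs = pvGlue b (List.splitOn '"' cs) := by
  induction cs with
  | nil => intro b; simp [pvGoA, List.splitOn, List.splitOnP_nil, pvGlue, pvSeg, pvSub]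
  | cons c cs ih =>
    intro b
    obtain ⟨q, ps, hq⟩ := List.exists_cons_of_ne_nil (pvSplitOn_ne_nil cs)
    by_cases hc : c = '"'
    · subst hc
      rw [pvSplitOn_cons]
      have hgo : pvGoA b ('"' :: cs) = '"' :: pvGoA (!b) cs := by simp [pvGoA]
      rw [hgo, ih, hq]
      cases b <;> simp [pvGlue, pvSeg, pvSub]
    · rw [pvSplitOn_cons, if_neg hc]
      have hgo : pvGoA b (c :: cs) = (if c == ',' && b then ' ' else c) :: pvGoA b cs := by
        simp [pvGoA, hc]
      rw [hgo, ih, hq, List.modifyHead]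
      have hseg : ∀ p, pvSeg b (c :: p) = (if c == ',' && b then ' ' else c) :: pvSeg b p := by
        intro p; cases b <;> simp [pvSeg, pvSub]
      cases ps with
      | nil => simp [pvGlue, hseg]
      | cons r rs => simp [pvGlue, hseg]

theorem pvEnum_glue (parts : List (List Char)) : ∀ (k : Int),
    List.intercalate ['"'] ((PySem.List.enumerate parts k).map (fun ip =>
      if ip.1 % 2 == 0 then ip.2
      else ip.2.map (fun c => if c == ',' then ' ' else c))) =
    pvGlue (k % 2 == 1) parts := by
  induction parts with
  | nil => intro k; simp [PySem.List.enumerate, pvGlue, List.intercalate]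
  | cons p ps ih =>
    intro k
    have hk : k % 2 = 0 ∨ k % 2 = 1 := by omega
    have hk1 : (k + 1) % 2 = 1 - k % 2 := by omega
    cases ps with
    | nil =>
      rcases hk with h | h <;>
        simp [PySem.List.enumerate, pvGlue, pvSeg, pvSub, List.intercalate, h]
    | cons q qs =>
      have := ih (k + 1)
      simp only [PySem.List.enumerate, List.map_cons] at this ⊢
      rw [pvIntercalate_cons_cons, this]
      rcases hk with h | h <;>
        simp [pvGlue, pvSeg, pvSub, h, hk1]

-- ===== VERDICT (by name: the statement is the Claim_ definition above) =====
theorem replace_comma_within_prices_spec : Claim_equal_replace_comma_within_prices := by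
  intro s _
  unfold Spec_replace_comma_within_prices replace_comma_within_prices replace_comma_within_prices_alt
  simp only
  rw [pvFoldA, pvGoA_glue, pvEnum_glue]
  simp
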